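-- pv_equiv track=rewrite | github.com/kimysub/doc-graph-rag | src/document_agent/parsers/office_parser.py | _split_pptx_slides
-- ===== SOURCE A (Python) =====
-- def _split_pptx_slides(content: str) -> list[str]:
--     """Split PPTX content into slides.
--
--     Args:
--         content: Full markdown content from MarkItDown.
--
--     Returns:
--         List of slide contents.
--     """
--     # MarkItDown typically uses "---" or "# Slide" patterns
--     slides = []
--     current_slide = []
--
--     for line in content.split("\n"):
--         if line.strip().startswith("# Slide") or line.strip() == "---":
--             if current_slide:
--                 slides.append("\n".join(current_slide))
--             current_slide = [line]
--         else:
--             current_slide.append(line)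
--
--     if current_slide:
--         slides.append("\n".join(current_slide))
--
--     return slides if len(slides) > 1 else []
-- ===== SOURCE B (Python) =====
-- def _split_pptx_slides(content: str) -> list[str]:
--     """Split PPTX markdown into slides: recursive span-based segmentation
--     instead of an accumulator loop."""
--     def _is_boundary(line):
--         s = line.strip()
--         return s.startswith("# Slide") or s == "---"
--
--     def _segments(ls):
--         if not ls:
--             return []
--         i = 1
--         while i < len(ls) and not _is_boundary(ls[i]):
--             i += 1
--         return [ls[:i]] + _segments(ls[i:])
--
--     slides = ["\n".join(seg) for seg in _segments(content.split("\n"))]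
--     return slides if len(slides) > 1 else []
-- ===== Notes on version B (the rewrite author's own statement) =====
-- stated objective: alternative
-- what changed: Replaces A's accumulator loop (mutable current_slide flushed into slides at each boundary and at the end) by a recursive span-based segmentation: each segment is the head line plus the following run of non-boundary lines, and the slide strings are produced by one map/join over the segment list.
import Mathlib
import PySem

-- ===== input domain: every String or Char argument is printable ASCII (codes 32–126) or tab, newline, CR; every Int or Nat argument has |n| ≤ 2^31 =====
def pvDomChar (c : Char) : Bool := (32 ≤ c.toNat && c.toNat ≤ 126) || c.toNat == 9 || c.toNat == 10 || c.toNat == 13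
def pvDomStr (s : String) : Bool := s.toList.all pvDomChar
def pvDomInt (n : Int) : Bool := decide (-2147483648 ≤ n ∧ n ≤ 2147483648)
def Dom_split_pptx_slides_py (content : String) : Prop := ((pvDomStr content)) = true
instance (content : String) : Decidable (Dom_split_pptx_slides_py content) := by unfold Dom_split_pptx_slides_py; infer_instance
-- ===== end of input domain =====

-- B replaces A's accumulator loop by a recursive span-based segmentation (same result, same cost).

-- shared helpers: the boundary test (line.strip().startswith("# Slide") or line.strip() == "---")
-- and content.split("\n") (sep is the nonempty literal "\n", so Python's split never raises;
-- PySem.Chars.splitOn is the sep ≠ "" form of split, exact here)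
def pvIsBoundary (line : String) : Bool :=
  PySem.Str.startswith (PySem.Str.strip line) "# Slide" || (PySem.Str.strip line == "---")

def pvSplitNL (content : String) : List String :=
  (PySem.Chars.splitOn content.toList ['\n']).map String.ofList

-- ===== PORT A =====
-- 'if current_slide: slides.append("\n".join(current_slide))'
def pvFlush (st : List String × List String) : List String :=
  if st.2.isEmpty then st.1 else st.1 ++ [PySem.Str.join "\n" st.2]

def pvStepA (st : List String × List String) (line : String) : List String × List String :=
  if pvIsBoundary line then (pvFlush st, [line]) else (st.1, st.2 ++ [line])

def split_pptx_slides_py (content : String) : List String :=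
  let st := (pvSplitNL content).foldl pvStepA ([], [])
  let slides := pvFlush st
  if slides.length > 1 then slides else []

-- ===== PORT B =====
-- _segments: each segment = head line plus the following run of non-boundary lines
def pvSegments : List String → List (List String)
  | [] => []
  | l :: ls =>
      (l :: ls.takeWhile (fun x => !pvIsBoundary x)) ::
        pvSegments (ls.dropWhile (fun x => !pvIsBoundary x))
termination_by ls => ls.length
decreasing_by
  exact Nat.lt_succ_of_le (List.length_dropWhile_le _ _)

def split_pptx_slides_py_alt (content : String) : List String :=
  let slides := (pvSegments (pvSplitNL content)).map (PySem.Str.join "\n")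
  if slides.length > 1 then slides else []

-- ===== PRECONDITION & SPEC =====
def Spec_split_pptx_slides_py (content : String) (out : List String) : Prop := out = split_pptx_slides_py_alt content
instance (content : String) (out : List String) : Decidable (Spec_split_pptx_slides_py content out) := by unfold Spec_split_pptx_slides_py; infer_instance

-- ===== CLAIM (what is proved, stated in full; the proofs are below) =====
def Claim_equal_split_pptx_slides_py : Prop := ∀ (content : String), Dom_split_pptx_slides_py content → Spec_split_pptx_slides_py content (split_pptx_slides_py content)

-- ===== LEMMAS AND PROOFS =====

-- split never returns an empty list of pieces
lemma pvSplitOn_go_ne_nil (sep : List Char) (fuel : Nat) :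
    ∀ (l cur : List Char) (acc : List (List Char)),
      PySem.Chars.splitOn.go sep fuel l cur acc ≠ [] := by
  induction fuel with
  | zero => intro l cur acc; simp [PySem.Chars.splitOn.go]
  | succ n ih =>
      intro l cur acc
      cases l with
      | nil => simp [PySem.Chars.splitOn.go]
      | cons c rest =>
          simp only [PySem.Chars.splitOn.go]
          split
          · exact ih _ _ _
          · exact ih _ _ _

lemma pvSplitNL_ne_nil (content : String) : pvSplitNL content ≠ [] := by
  unfold pvSplitNL PySem.Chars.splitOn
  intro h
  exact pvSplitOn_go_ne_nil _ _ _ _ _ (List.map_eq_nil_iff.mp h)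

-- the loop invariant: with a nonempty current slide, A's fold produces exactly
-- the already-flushed slides followed by the span-based segmentation of the rest
lemma pvFoldA_segments (lines : List String) :
    ∀ (slides cur : List String), cur ≠ [] →
      pvFlush (lines.foldl pvStepA (slides, cur)) =
        slides ++ ((cur ++ lines.takeWhile (fun x => !pvIsBoundary x)) ::
          pvSegments (lines.dropWhile (fun x => !pvIsBoundary x))).map (PySem.Str.join "\n") := by
  induction lines with
  | nil =>
      intro slides cur hcur
      simp [pvFlush, pvSegments, hcur]
  | cons l ls ih =>
      intro slides cur hcur
      by_cases hb : pvIsBoundary l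
      · have hstep : pvStepA (slides, cur) l = (slides ++ [PySem.Str.join "\n" cur], [l]) := by
          simp [pvStepA, pvFlush, hb, hcur]
        rw [List.foldl_cons, hstep, ih _ [l] (by simp)]
        simp [hb, pvSegments]
      · have hstep : pvStepA (slides, cur) l = (slides, cur ++ [l]) := by
          simp [pvStepA, hb]
        rw [List.foldl_cons, hstep, ih _ _ (by simp)]
        simp [hb]

-- ===== VERDICT (by name: the statement is the Claim_ definition above) =====
theorem split_pptx_slides_py_spec : Claim_equal_split_pptx_slides_py := by
  intro content _
  show split_pptx_slides_py content = split_pptx_slides_py_alt content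
  have key : pvFlush ((pvSplitNL content).foldl pvStepA ([], [])) =
      (pvSegments (pvSplitNL content)).map (PySem.Str.join "\n") := by
    obtain ⟨l, ls, hls⟩ := List.exists_cons_of_ne_nil (pvSplitNL_ne_nil content)
    have h0 : pvStepA ([], []) l = ([], [l]) := by
      by_cases hb : pvIsBoundary l <;> simp [pvStepA, pvFlush, hb]
    rw [hls, List.foldl_cons, h0, pvFoldA_segments ls [] [l] (by simp)]
    simp [pvSegments]
  simp only [split_pptx_slides_py, split_pptx_slides_py_alt, key]
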